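-- pv_equiv track=rewrite | github.com/pratyushparth229/Household-Services-Application | Code/backend/controller.py | segregate_requests_by_status
-- ===== SOURCE A (Python) =====
-- def segregate_requests_by_status(requests):
--     """
--     Segregates requests into two lists based on their status.
--
--     Parameters:
--         requests (list): A list of dictionaries, each representing a request.
--
--     Returns:
--         tuple: Two lists - one containing requests with status 'accepted',
--                and the other containing requests with status 'closed'.
--     """
--     accepted_requests = [
--         request for request in requests if request.get("status") == "accepted"
--     ]
--     closed_requests = [
--         request for request in requests if request.get("status") == "closed"
--     ]
--     return accepted_requests, closed_requests
-- ===== SOURCE B (Python) =====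
-- def segregate_requests_by_status(requests):
--     accepted_requests = []
--     closed_requests = []
--     for request in requests:
--         status = request.get("status")
--         if status == "accepted":
--             accepted_requests.append(request)
--         elif status == "closed":
--             closed_requests.append(request)
--     return accepted_requests, closed_requests
-- ===== Notes on version B (the rewrite author's own statement) =====
-- stated objective: simpler
-- what changed: Replaced the two list-comprehension scans over requests with one single-pass loop that reads each request's status once and appends it to the matching accumulator.
import Mathlib
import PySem

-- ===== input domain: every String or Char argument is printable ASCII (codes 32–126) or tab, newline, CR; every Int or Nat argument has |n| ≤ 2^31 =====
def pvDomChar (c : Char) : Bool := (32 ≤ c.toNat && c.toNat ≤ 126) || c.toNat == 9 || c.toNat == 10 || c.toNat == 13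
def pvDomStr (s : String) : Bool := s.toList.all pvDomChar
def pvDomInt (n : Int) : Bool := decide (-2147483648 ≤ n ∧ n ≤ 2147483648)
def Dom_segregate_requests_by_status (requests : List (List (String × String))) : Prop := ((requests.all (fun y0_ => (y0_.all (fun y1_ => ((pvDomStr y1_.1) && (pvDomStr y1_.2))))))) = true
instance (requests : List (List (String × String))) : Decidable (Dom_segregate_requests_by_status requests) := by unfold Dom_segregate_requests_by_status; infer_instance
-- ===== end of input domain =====

-- B replaces A's two filtering scans with one single-pass loop (simpler: one traversal, one status read per request).

-- ===== PORT A =====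
-- request.get("status") on the association-list dict
def pvGetStatus (request : List (String × String)) : Option String :=
  (PySem.Dict.mk request).get? "status"

def segregate_requests_by_status (requests : List (List (String × String))) : (List (List (String × String))) × (List (List (String × String))) :=
  let accepted_requests := requests.filter (fun request => pvGetStatus request == some "accepted")
  let closed_requests := requests.filter (fun request => pvGetStatus request == some "closed")
  (accepted_requests, closed_requests)

-- ===== PORT B =====
def segregate_requests_by_status_alt (requests : List (List (String × String))) : (List (List (String × String))) × (List (List (String × String))) :=
  requests.foldl
    (fun acc request =>
      let status := pvGetStatus request
      if status == some "accepted" then (acc.1 ++ [request], acc.2)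
      else if status == some "closed" then (acc.1, acc.2 ++ [request])
      else acc)
    ([], [])

-- ===== PRECONDITION & SPEC =====
def Spec_segregate_requests_by_status (requests : List (List (String × String))) (out : (List (List (String × String))) × (List (List (String × String)))) : Prop := out = segregate_requests_by_status_alt requests
instance (requests : List (List (String × String))) (out : (List (List (String × String))) × (List (List (String × String)))) : Decidable (Spec_segregate_requests_by_status requests out) := by unfold Spec_segregate_requests_by_status; infer_instance

-- ===== CLAIM (what is proved, stated in full; the proofs are below) =====
def Claim_equal_segregate_requests_by_status : Prop := ∀ (requests : List (List (String × String))), Dom_segregate_requests_by_status requests → Spec_segregate_requests_by_status requests (segregate_requests_by_status requests)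

-- ===== LEMMAS AND PROOFS =====

theorem seg_foldl_acc (requests : List (List (String × String)))
    (acc : (List (List (String × String))) × (List (List (String × String)))) :
    requests.foldl
      (fun acc request =>
        let status := pvGetStatus request
        if status == some "accepted" then (acc.1 ++ [request], acc.2)
        else if status == some "closed" then (acc.1, acc.2 ++ [request])
        else acc)
      acc
    = (acc.1 ++ requests.filter (fun request => pvGetStatus request == some "accepted"),
       acc.2 ++ requests.filter (fun request => pvGetStatus request == some "closed")) := by
  induction requests generalizing acc with
  | nil => simp
  | cons r rs ih =>
    simp only [List.foldl_cons, List.filter_cons]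
    by_cases h1 : pvGetStatus r == some "accepted"
    · have h2 : ¬ (pvGetStatus r == some "closed") = true := by
        simp only [beq_iff_eq] at h1 ⊢; simp [h1]
      simp only [h1, h2, if_pos, ih]
      simp
    · by_cases h2 : pvGetStatus r == some "closed"
      · simp only [h1, h2, if_pos, ih]
        simp
      · simp only [h1, h2, ih]
        simp

-- ===== VERDICT (by name: the statement is the Claim_ definition above) =====
theorem segregate_requests_by_status_spec : Claim_equal_segregate_requests_by_status := by
  intro requests _
  unfold Spec_segregate_requests_by_status segregate_requests_by_status segregate_requests_by_status_alt
  rw [seg_foldl_acc]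
  simp
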